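-- pv_equiv track=rewrite | github.com/littleclouds/VISAPYQ | Overlapping ABBA.py | has_non_overlapping_substrings
-- ===== SOURCE A (Python) =====
-- def has_non_overlapping_substrings(s):
--     n = len(s)
--     found_ab = False
--     found_ba = False
--
--     i = 0
--     while i < n - 1:
--         if s[i:i+2] == "AB":
--             if found_ba:
--                 return True
--             found_ab = True
--             i += 1
--         elif s[i:i+2] == "BA":
--             if found_ab:
--                 return True
--             found_ba = True
--             i += 1
--         i += 1
--
--     return False
-- ===== SOURCE B (Python) =====
-- import re
--
-- def has_non_overlapping_substrings(s):
--     matches = re.findall(r"AB|BA", s)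
--     return "AB" in matches and "BA" in matches
-- ===== Notes on version B (the rewrite author's own statement) =====
-- stated objective: idiomatic
-- what changed: Replaces A's explicit while-loop state machine (two boolean flags, manual index skipping by 1 or 2) with a single re.findall regex tokenization of the two digrams followed by two list-membership tests.
import Mathlib
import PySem

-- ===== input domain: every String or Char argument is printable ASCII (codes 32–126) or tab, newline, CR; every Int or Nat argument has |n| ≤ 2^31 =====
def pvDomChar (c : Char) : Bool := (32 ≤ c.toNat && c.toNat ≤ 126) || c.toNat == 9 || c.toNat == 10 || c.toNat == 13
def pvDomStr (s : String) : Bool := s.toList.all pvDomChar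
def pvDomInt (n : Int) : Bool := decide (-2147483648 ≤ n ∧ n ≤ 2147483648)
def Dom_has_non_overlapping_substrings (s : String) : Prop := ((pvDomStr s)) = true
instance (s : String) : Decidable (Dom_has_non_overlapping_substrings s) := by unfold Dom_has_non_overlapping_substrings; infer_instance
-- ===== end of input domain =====

-- B replaces A's explicit index-skipping state machine (two boolean flags, manual i += 1/2)
-- with re.findall(r"AB|BA", s) — the same greedy left-to-right tokenization done by the
-- library — followed by two membership tests (objective: idiomatic).

-- ===== PORT A =====
-- the while loop of A, state (i, found_ab, found_ba); s[i:i+2] is PySem.List.slice.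
-- 'fuel' only makes the loop total: it is started at len(s), an upper bound on the
-- number of iterations (i strictly increases and the loop stops at i ≥ len(s) - 1)
def pvLoopA (cs : List Char) : Nat → Nat → Bool → Bool → Bool
  | 0, _, _, _ => false
  | fuel + 1, i, found_ab, found_ba =>
    if i < cs.length - 1 then
      if PySem.List.slice cs (some (i : Int)) (some ((i : Int) + 2)) = ['A', 'B'] then
        if found_ba then true
        else pvLoopA cs fuel (i + 1 + 1) true found_ba
      else if PySem.List.slice cs (some (i : Int)) (some ((i : Int) + 2)) = ['B', 'A'] then
        if found_ab then true
        else pvLoopA cs fuel (i + 1 + 1) found_ab true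
      else pvLoopA cs fuel (i + 1) found_ab found_ba
    else false

def has_non_overlapping_substrings (s : String) : Bool :=
  pvLoopA s.toList s.toList.length 0 false false

-- ===== PORT B =====
-- hand port of re.findall(r"AB|BA", s): greedy left-to-right scan; a match emits its token
-- and consumes two characters, otherwise advance one char; exact for this two-literal alternation
def pvFindall : List Char → List String
  | c :: d :: rest =>
    if c = 'A' ∧ d = 'B' then "AB" :: pvFindall rest
    else if c = 'B' ∧ d = 'A' then "BA" :: pvFindall rest
    else pvFindall (d :: rest)
  | _ => []

def has_non_overlapping_substrings_alt (s : String) : Bool :=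
  let ms := pvFindall s.toList
  ms.contains "AB" && ms.contains "BA"

-- ===== PRECONDITION & SPEC =====
-- A is total on strings: no Pre_ needed
def Spec_has_non_overlapping_substrings (s : String) (out : Bool) : Prop := out = has_non_overlapping_substrings_alt s
instance (s : String) (out : Bool) : Decidable (Spec_has_non_overlapping_substrings s out) := by unfold Spec_has_non_overlapping_substrings; infer_instance

-- ===== CLAIM (what is proved, stated in full; the proofs are below) =====
def Claim_equal_has_non_overlapping_substrings : Prop := ∀ (s : String), Dom_has_non_overlapping_substrings s → Spec_has_non_overlapping_substrings s (has_non_overlapping_substrings s)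

-- ===== LEMMAS AND PROOFS =====

-- A's while loop, rephrased as a clean structural recursion over the remaining suffix
def pvScan : List Char → Bool → Bool → Bool
  | c :: d :: rest, ab, ba =>
    if c = 'A' ∧ d = 'B' then
      if ba then true else pvScan rest true ba
    else if c = 'B' ∧ d = 'A' then
      if ab then true else pvScan rest ab true
    else pvScan (d :: rest) ab ba
  | _, _, _ => false

lemma pvScan_cons (c d : Char) (rest : List Char) (ab ba : Bool) :
    pvScan (c :: d :: rest) ab ba =
      (if c = 'A' ∧ d = 'B' then (if ba then true else pvScan rest true ba)
       else if c = 'B' ∧ d = 'A' then (if ab then true else pvScan rest ab true)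
       else pvScan (d :: rest) ab ba) := by
  rw [pvScan.eq_def]

lemma pvScan_short (l : List Char) (h : l.length ≤ 1) (ab ba : Bool) :
    pvScan l ab ba = false := by
  rcases l with _ | ⟨c, _ | ⟨d, rest⟩⟩
  · rw [pvScan.eq_def]
  · rw [pvScan.eq_def]
  · simp at h

lemma pvFindall_cons (c d : Char) (rest : List Char) :
    pvFindall (c :: d :: rest) =
      (if c = 'A' ∧ d = 'B' then "AB" :: pvFindall rest
       else if c = 'B' ∧ d = 'A' then "BA" :: pvFindall rest
       else pvFindall (d :: rest)) := by
  rw [pvFindall.eq_def]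

lemma pvFindall_short (l : List Char) (h : l.length ≤ 1) : pvFindall l = [] := by
  rcases l with _ | ⟨c, _ | ⟨d, rest⟩⟩
  · rw [pvFindall.eq_def]
  · rw [pvFindall.eq_def]
  · simp at h

-- the flagged scan, characterised by which tokens the greedy tokenization yields
lemma pvScan_eq (l : List Char) (ab ba : Bool) :
    pvScan l ab ba =
      ((ab && (pvFindall l).contains "BA") ||
       (ba && (pvFindall l).contains "AB") ||
       ((pvFindall l).contains "AB" && (pvFindall l).contains "BA")) := by
  induction l, ab, ba using pvScan.induct with
  | case1 c d rest ab hc =>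
    obtain ⟨rfl, rfl⟩ := hc
    simp [pvScan_cons, pvFindall_cons]
  | case2 c d rest ab ba hc hba ih =>
    obtain ⟨rfl, rfl⟩ := hc
    simp only [Bool.not_eq_true] at hba; subst hba
    simp only [pvScan_cons, pvFindall_cons, if_neg (Bool.false_ne_true), ih]
    simp
    cases ab <;> simp
  | case3 c d rest ba hc1 hc2 =>
    obtain ⟨rfl, rfl⟩ := hc2
    simp [pvScan_cons, pvFindall_cons]
  | case4 c d rest ab ba hc1 hc2 hab ih =>
    obtain ⟨rfl, rfl⟩ := hc2
    simp only [Bool.not_eq_true] at hab; subst hab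
    simp only [pvScan_cons, pvFindall_cons, if_neg hc1, if_neg (Bool.false_ne_true), ih]
    simp
    cases ba <;> simp <;> tauto
  | case5 c d rest ab ba hc1 hc2 ih =>
    rw [pvScan_cons, if_neg hc1, if_neg hc2, pvFindall_cons, if_neg hc1, if_neg hc2, ih]
  | case6 l ab ba h =>
    have hlen : l.length ≤ 1 := by
      rcases l with _ | ⟨c, _ | ⟨d, rest⟩⟩
      · simp
      · simp
      · exact absurd rfl (h c d rest)
    rw [pvScan_short l hlen, pvFindall_short l hlen]
    simp

-- A's fuelled index loop agrees with the suffix scan whenever the fuel covers the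
-- remaining iterations
lemma pvLoopA_eq_scan (cs : List Char) (fuel : Nat) :
    ∀ (i : Nat) (ab ba : Bool), cs.length - 1 ≤ i + fuel →
      pvLoopA cs fuel i ab ba = pvScan (cs.drop i) ab ba := by
  induction fuel with
  | zero =>
    intro i ab ba hfuel
    rw [pvLoopA, pvScan_short]
    simp; omega
  | succ fuel ih =>
    intro i ab ba hfuel
    by_cases h : i < cs.length - 1
    · have hcast : ((i:Int) + 2) = ((i:Int) + ((2:Nat):Int)) := by norm_num
      by_cases hsl : PySem.List.slice cs (some (i : Int)) (some ((i : Int) + 2)) = ['A', 'B']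
      · have hsl' : (cs.drop i).take 2 = ['A', 'B'] := by
          rw [hcast, PySem.List.slice_natCast_add] at hsl; exact hsl
        have hsplit : cs.drop i = 'A' :: 'B' :: (cs.drop i).drop 2 := by
          conv_lhs => rw [← List.take_append_drop 2 (cs.drop i)]
          rw [hsl']; rfl
        have hd2 : cs.drop (i + 1 + 1) = (cs.drop i).drop 2 := by
          rw [List.drop_drop]
        rcases ba with _ | _
        · rw [pvLoopA, if_pos h, if_pos hsl, if_neg Bool.false_ne_true,
            ih (i + 1 + 1) true false (by omega), hd2]
          conv_rhs => rw [hsplit]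
          rw [pvScan_cons]
          simp
        · rw [pvLoopA, if_pos h, if_pos hsl, if_pos rfl, hsplit, pvScan_cons]
          simp
      · by_cases hsl2 : PySem.List.slice cs (some (i : Int)) (some ((i : Int) + 2)) = ['B', 'A']
        · have hsl' : (cs.drop i).take 2 = ['B', 'A'] := by
            rw [hcast, PySem.List.slice_natCast_add] at hsl2; exact hsl2
          have hsplit : cs.drop i = 'B' :: 'A' :: (cs.drop i).drop 2 := by
            conv_lhs => rw [← List.take_append_drop 2 (cs.drop i)]
            rw [hsl']; rfl
          have hd2 : cs.drop (i + 1 + 1) = (cs.drop i).drop 2 := by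
            rw [List.drop_drop]
          rcases ab with _ | _
          · rw [pvLoopA, if_pos h, if_neg hsl, if_pos hsl2, if_neg Bool.false_ne_true,
              ih (i + 1 + 1) false true (by omega), hd2]
            conv_rhs => rw [hsplit]
            rw [pvScan_cons]
            simp
          · rw [pvLoopA, if_pos h, if_neg hsl, if_pos hsl2, if_pos rfl, hsplit, pvScan_cons]
            simp
        · have hlen : 2 ≤ (cs.drop i).length := by simp; omega
          obtain ⟨c, d, rest, hrest⟩ : ∃ c d rest, cs.drop i = c :: d :: rest := by
            rcases e : cs.drop i with _ | ⟨c, _ | ⟨d, rest⟩⟩ <;> simp [e] at hlen ⊢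
          have hsl1' : ¬(c = 'A' ∧ d = 'B') := by
            rintro ⟨rfl, rfl⟩
            exact hsl (by rw [hcast, PySem.List.slice_natCast_add, hrest]; simp)
          have hsl2' : ¬(c = 'B' ∧ d = 'A') := by
            rintro ⟨rfl, rfl⟩
            exact hsl2 (by rw [hcast, PySem.List.slice_natCast_add, hrest]; simp)
          have hd1 : cs.drop (i + 1) = d :: rest := by
            have := congrArg (List.drop 1) hrest
            simpa [List.drop_drop, Nat.add_comm] using this
          rw [pvLoopA, if_pos h, if_neg hsl, if_neg hsl2, ih (i + 1) ab ba (by omega),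
            hd1, hrest, pvScan_cons, if_neg hsl1', if_neg hsl2']
    · rw [pvLoopA, if_neg h, pvScan_short]
      simp; omega

-- ===== VERDICT (by name: the statement is the Claim_ definition above) =====
theorem has_non_overlapping_substrings_spec : Claim_equal_has_non_overlapping_substrings := by
  intro s _
  show has_non_overlapping_substrings s = has_non_overlapping_substrings_alt s
  rw [has_non_overlapping_substrings, pvLoopA_eq_scan s.toList s.toList.length 0 false false (by omega),
    List.drop_zero, pvScan_eq]
  simp [has_non_overlapping_substrings_alt]
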